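-- pv_equiv track=rewrite | github.com/craigsimm/pixel-fix | src/pixel_fix/gui/processing.py | _raw_exterior_outline_mask
-- ===== SOURCE A (Python) =====
-- def _raw_exterior_outline_mask(visible: list[list[bool]], exterior: list[list[bool]]) -> list[list[bool]]:
--     height = len(visible)
--     width = len(visible[0]) if height else 0
--     outline = [[False] * width for _ in range(height)]
--     for y in range(height):
--         for x in range(width):
--             if visible[y][x] or not exterior[y][x]:
--                 continue
--             outline[y][x] = _touches_visible_pixel(visible, x, y)
--     return outline
--
-- def _touches_visible_pixel(visible: list[list[bool]], x: int, y: int) -> bool: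
--     height = len(visible)
--     width = len(visible[0]) if height else 0
--     for neighbor_y in range(max(0, y - 1), min(height, y + 2)):
--         for neighbor_x in range(max(0, x - 1), min(width, x + 2)):
--             if neighbor_x == x and neighbor_y == y:
--                 continue
--             if visible[neighbor_y][neighbor_x]:
--                 return True
--     return False
-- ===== SOURCE B (Python) =====
-- def _raw_exterior_outline_mask(visible: list[list[bool]], exterior: list[list[bool]]) -> list[list[bool]]:
--     height = len(visible)
--     width = len(visible[0]) if height else 0
--     # horizontal dilation of each visible row, then a vertical 3-row OR:
--     # near[y][x] == "some visible pixel in the clamped 3x3 block around (y,x)"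
--     hrows = [
--         [
--             (x > 0 and row[x - 1]) or row[x] or (x + 1 < width and row[x + 1])
--             for x in range(width)
--         ]
--         for row in visible
--     ]
--     out = []
--     for y in range(height):
--         out_row = []
--         for x in range(width):
--             near = (
--                 (y > 0 and hrows[y - 1][x])
--                 or hrows[y][x]
--                 or (y + 1 < height and hrows[y + 1][x])
--             )
--             out_row.append((not visible[y][x]) and exterior[y][x] and near)
--         out.append(out_row)
--     return out
-- ===== Notes on version B (the rewrite author's own statement) =====
-- stated objective: faster
-- what changed: Replaces the per-candidate-cell 3x3 neighbor scan with a separable dilation: one horizontal 1D dilation pass over the visible rows, then a vertical 3-row OR, gated by (not visible) and exterior.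
import Mathlib
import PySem

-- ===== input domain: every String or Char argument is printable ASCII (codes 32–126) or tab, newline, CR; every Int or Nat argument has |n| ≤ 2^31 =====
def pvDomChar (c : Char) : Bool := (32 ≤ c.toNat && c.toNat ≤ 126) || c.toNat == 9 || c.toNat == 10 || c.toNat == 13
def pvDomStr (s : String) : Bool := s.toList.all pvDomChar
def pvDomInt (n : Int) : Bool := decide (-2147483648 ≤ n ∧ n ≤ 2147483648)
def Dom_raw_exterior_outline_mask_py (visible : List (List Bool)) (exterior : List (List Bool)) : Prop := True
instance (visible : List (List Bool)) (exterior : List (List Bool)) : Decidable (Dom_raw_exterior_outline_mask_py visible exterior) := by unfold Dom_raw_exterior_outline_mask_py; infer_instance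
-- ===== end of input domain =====

-- B replaces the per-cell 3x3 neighbor scan by a separable dilation (horizontal pass, then
-- vertical 3-row OR); same cost class, different algorithm. Equivalence is on return values.

-- ===== PORT A =====
-- helper: Python _touches_visible_pixel (indexing via getD; exact on Pre_, where all reads are in range)
def pvTouchesVisible (visible : List (List Bool)) (x y : Nat) : Bool :=
  let height := visible.length
  let width := (visible.headD []).length
  (List.range' (y - 1) (min height (y + 2) - (y - 1))).any fun ny =>
    (List.range' (x - 1) (min width (x + 2) - (x - 1))).any fun nx =>
      if nx = x ∧ ny = y then false
      else (visible.getD ny []).getD nx false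

def raw_exterior_outline_mask_py (visible : List (List Bool)) (exterior : List (List Bool)) : List (List Bool) :=
  let height := visible.length
  let width := (visible.headD []).length
  (List.range height).map fun y =>
    (List.range width).map fun x =>
      if ((visible.getD y []).getD x false) || !((exterior.getD y []).getD x false) then false
      else pvTouchesVisible visible x y

-- ===== PORT B =====
-- helper: horizontal 1D dilation of one row (Source B's hrows comprehension)
def pvHDil (width : Nat) (row : List Bool) : List Bool :=
  (List.range width).map fun x =>
    (decide (0 < x) && row.getD (x - 1) false) || row.getD x false ||
      (decide (x + 1 < width) && row.getD (x + 1) false)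

def raw_exterior_outline_mask_py_alt (visible : List (List Bool)) (exterior : List (List Bool)) : List (List Bool) :=
  let height := visible.length
  let width := (visible.headD []).length
  let hrows := visible.map fun row => pvHDil width row
  (List.range height).map fun y =>
    (List.range width).map fun x =>
      let near := (decide (0 < y) && (hrows.getD (y - 1) []).getD x false) ||
        (hrows.getD y []).getD x false ||
        (decide (y + 1 < height) && (hrows.getD (y + 1) []).getD x false)
      !((visible.getD y []).getD x false) && ((exterior.getD y []).getD x false) && near

-- ===== PRECONDITION & SPEC =====
-- Pre_ = exactly the inputs where Python A returns (no IndexError): every visible row reaches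
-- the width of the first row, and exterior[y][x] exists wherever it is read (at non-visible cells).
-- (Both Lean ports totalize out-of-range reads with getD, so their equality below holds even
-- without Pre_; Pre_'s role is to exclude the inputs where the Pythons raise.)
def Pre_raw_exterior_outline_mask_py (visible : List (List Bool)) (exterior : List (List Bool)) : Prop :=
  (∀ row ∈ visible, (visible.headD []).length ≤ row.length) ∧
  (∀ y < visible.length, ∀ x < (visible.headD []).length,
    (visible.getD y []).getD x false = false →
      y < exterior.length ∧ x < (exterior.getD y []).length)
instance (visible : List (List Bool)) (exterior : List (List Bool)) : Decidable (Pre_raw_exterior_outline_mask_py visible exterior) := by unfold Pre_raw_exterior_outline_mask_py; infer_instance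
def pvWitness_raw_exterior_outline_mask_py : List (List Bool) × List (List Bool) :=
  ([[false, true], [false, false]], [[true, true], [true, false]])

def Spec_raw_exterior_outline_mask_py (visible : List (List Bool)) (exterior : List (List Bool)) (out : List (List Bool)) : Prop := out = raw_exterior_outline_mask_py_alt visible exterior
instance (visible : List (List Bool)) (exterior : List (List Bool)) (out : List (List Bool)) : Decidable (Spec_raw_exterior_outline_mask_py visible exterior out) := by unfold Spec_raw_exterior_outline_mask_py; infer_instance

-- ===== CLAIM (what is proved, stated in full; the proofs are below) =====
def Claim_equal_raw_exterior_outline_mask_py : Prop := ∀ (visible : List (List Bool)) (exterior : List (List Bool)), Dom_raw_exterior_outline_mask_py visible exterior → Pre_raw_exterior_outline_mask_py visible exterior → Spec_raw_exterior_outline_mask_py visible exterior (raw_exterior_outline_mask_py visible exterior)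



-- ===== LEMMAS AND PROOFS =====

def pvV (visible : List (List Bool)) (a b : Nat) : Bool := (visible.getD a []).getD b false

-- one horizontally-dilated cell, written out
def pvRowT (visible : List (List Bool)) (x ny : Nat) : Bool :=
  (decide (0 < x) && pvV visible ny (x - 1)) || pvV visible ny x ||
    (decide (x + 1 < (visible.headD []).length) && pvV visible ny (x + 1))

-- "some visible pixel in the clamped 3x3 block around (y,x)"
def pvNearProp (visible : List (List Bool)) (y x : Nat) : Prop :=
  ∃ ny nx, ny < visible.length ∧ nx < (visible.headD []).length ∧
    y ≤ ny + 1 ∧ ny ≤ y + 1 ∧ x ≤ nx + 1 ∧ nx ≤ x + 1 ∧ pvV visible ny nx = true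

theorem pv_getD_map_range {α : Type} (n : Nat) (f : Nat → α) (i : Nat) (d : α) :
    (((List.range n).map f).getD i d) = if i < n then f i else d := by
  by_cases h : i < n <;> simp [List.getD_eq_getElem?_getD, h]

theorem pv_getD_map {α β : Type} (l : List α) (f : α → β) (i : Nat) (d : β) (d' : α)
    (hi : i < l.length) : ((l.map f).getD i d) = f (l.getD i d') := by
  simp [List.getD_eq_getElem?_getD, hi]

theorem pv_hdil_getD (visible : List (List Bool)) (ny x : Nat)
    (hx : x < (visible.headD []).length) (hny : ny < visible.length) :
    ((visible.map fun row => pvHDil (visible.headD []).length row).getD ny []).getD x false =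
      pvRowT visible x ny := by
  rw [pv_getD_map _ _ _ _ [] hny]
  unfold pvHDil pvRowT
  rw [pv_getD_map_range, if_pos hx]
  simp [pvV]

theorem pv_rowT_iff (visible : List (List Bool)) (ny x : Nat)
    (hx : x < (visible.headD []).length) :
    pvRowT visible x ny = true ↔
      ∃ nx, nx < (visible.headD []).length ∧ x ≤ nx + 1 ∧ nx ≤ x + 1 ∧
        pvV visible ny nx = true := by
  unfold pvRowT
  simp only [Bool.or_eq_true, Bool.and_eq_true, decide_eq_true_eq]
  constructor
  · rintro ((⟨hxp, hval⟩ | hval) | ⟨hxp, hval⟩)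
    · exact ⟨x - 1, by omega, by omega, by omega, hval⟩
    · exact ⟨x, hx, by omega, by omega, hval⟩
    · exact ⟨x + 1, hxp, by omega, by omega, hval⟩
  · rintro ⟨nx, b1, b2, b3, hval⟩
    rcases Nat.lt_trichotomy nx x with h | h | h
    · exact Or.inl (Or.inl ⟨by omega, by rw [show x - 1 = nx by omega]; exact hval⟩)
    · exact Or.inl (Or.inr (by rw [← h]; exact hval))
    · exact Or.inr ⟨by omega, by rw [show x + 1 = nx by omega]; exact hval⟩

theorem pv_touches_iff (visible : List (List Bool)) (y x : Nat)
    (hy : y < visible.length) (hx : x < (visible.headD []).length)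
    (hv : pvV visible y x = false) :
    pvTouchesVisible visible x y = true ↔ pvNearProp visible y x := by
  unfold pvTouchesVisible pvNearProp
  unfold pvV at hv
  simp only [List.any_eq_true, List.mem_range'_1]
  constructor
  · rintro ⟨ny, ⟨h1, h2⟩, nx, ⟨h3, h4⟩, hval⟩
    split_ifs at hval with hc
    exact ⟨ny, nx, by omega, by omega, by omega, by omega, by omega, by omega, hval⟩
  · rintro ⟨ny, nx, b1, b2, b3, b4, b5, b6, hval⟩
    by_cases hc : nx = x ∧ ny = y
    · rw [hc.1, hc.2] at hval
      unfold pvV at hval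
      rw [hval] at hv
      simp at hv
    · exact ⟨ny, ⟨by omega, by omega⟩, nx, ⟨by omega, by omega⟩,
        by rw [if_neg hc]; exact hval⟩

theorem pv_near_iff (visible : List (List Bool)) (y x : Nat)
    (hy : y < visible.length) (hx : x < (visible.headD []).length) :
    ((decide (0 < y) && ((visible.map fun row => pvHDil (visible.headD []).length row).getD (y - 1) []).getD x false) ||
      ((visible.map fun row => pvHDil (visible.headD []).length row).getD y []).getD x false ||
      (decide (y + 1 < visible.length) && ((visible.map fun row => pvHDil (visible.headD []).length row).getD (y + 1) []).getD x false)) = true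
    ↔ pvNearProp visible y x := by
  unfold pvNearProp
  constructor
  · intro hb
    simp only [Bool.or_eq_true, Bool.and_eq_true, decide_eq_true_eq] at hb
    rcases hb with (⟨h0, hval⟩ | hval) | ⟨h2, hval⟩
    · rw [pv_hdil_getD visible (y - 1) x hx (by omega)] at hval
      obtain ⟨nx, w1, w2, w3, hv2⟩ := (pv_rowT_iff visible (y - 1) x hx).mp hval
      exact ⟨y - 1, nx, by omega, w1, by omega, by omega, w2, w3, hv2⟩
    · rw [pv_hdil_getD visible y x hx hy] at hval
      obtain ⟨nx, w1, w2, w3, hv2⟩ := (pv_rowT_iff visible y x hx).mp hval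
      exact ⟨y, nx, hy, w1, by omega, by omega, w2, w3, hv2⟩
    · rw [pv_hdil_getD visible (y + 1) x hx h2] at hval
      obtain ⟨nx, w1, w2, w3, hv2⟩ := (pv_rowT_iff visible (y + 1) x hx).mp hval
      exact ⟨y + 1, nx, h2, w1, by omega, by omega, w2, w3, hv2⟩
  · rintro ⟨ny, nx, b1, b2, b3, b4, b5, b6, hval⟩
    simp only [Bool.or_eq_true, Bool.and_eq_true, decide_eq_true_eq]
    have hrow : pvRowT visible x ny = true :=
      (pv_rowT_iff visible ny x hx).mpr ⟨nx, b2, b5, b6, hval⟩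
    rcases Nat.lt_trichotomy ny y with hny | hny | hny
    · exact Or.inl (Or.inl ⟨by omega,
        by rw [pv_hdil_getD visible (y - 1) x hx (by omega), show y - 1 = ny by omega]; exact hrow⟩)
    · exact Or.inl (Or.inr
        (by rw [pv_hdil_getD visible y x hx hy, ← hny]; exact hrow))
    · exact Or.inr ⟨by omega,
        by rw [pv_hdil_getD visible (y + 1) x hx (by omega), show y + 1 = ny by omega]; exact hrow⟩

-- core cell lemma: on a non-visible cell, A's 3x3 scan equals B's separable-dilation value
theorem pv_cell_eq (visible : List (List Bool)) (y x : Nat)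
    (hy : y < visible.length) (hx : x < (visible.headD []).length)
    (hv : (visible.getD y []).getD x false = false) :
    pvTouchesVisible visible x y =
      ((decide (0 < y) && ((visible.map fun row => pvHDil (visible.headD []).length row).getD (y - 1) []).getD x false) ||
        ((visible.map fun row => pvHDil (visible.headD []).length row).getD y []).getD x false ||
        (decide (y + 1 < visible.length) && ((visible.map fun row => pvHDil (visible.headD []).length row).getD (y + 1) []).getD x false)) := by
  rw [Bool.eq_iff_iff, pv_touches_iff visible y x hy hx hv, pv_near_iff visible y x hy hx]

-- ===== VERDICT (by name: the statement is the Claim_ definition above) =====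
theorem raw_exterior_outline_mask_py_spec : Claim_equal_raw_exterior_outline_mask_py := by
  intro visible exterior _ _
  unfold Spec_raw_exterior_outline_mask_py raw_exterior_outline_mask_py raw_exterior_outline_mask_py_alt
  refine List.map_congr_left fun y hy => ?_
  refine List.map_congr_left fun x hx => ?_
  rw [List.mem_range] at hy hx
  rcases hvv : (visible.getD y []).getD x false with _ | _ <;>
    rcases hee : (exterior.getD y []).getD x false with _ | _ <;>
      simp only [Bool.not_false, Bool.not_true, Bool.false_and, Bool.true_and,
        Bool.and_false, Bool.and_true, Bool.or_false, Bool.or_true, if_true]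
  exact pv_cell_eq visible y x hy hx hvv
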